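-- pv_equiv track=rewrite | github.com/vidvudsc/AsteroidFinder | ztf.py | _candidate_data_urls
-- ===== SOURCE A (Python) =====
-- IRSA_HOSTS = [
--     "https://irsa.ipac.caltech.edu",
--     "https://irsawebops2.ipac.caltech.edu",
-- ]
--
-- def _candidate_data_urls(url: str) -> list[str]:
--     urls = [url]
--     for host in IRSA_HOSTS:
--         for existing in IRSA_HOSTS:
--             if url.startswith(existing):
--                 candidate = host + url[len(existing) :]
--                 if candidate not in urls:
--                     urls.append(candidate)
--     return urls
-- ===== SOURCE B (Python) =====
-- IRSA_HOSTS = [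
--     "https://irsa.ipac.caltech.edu",
--     "https://irsawebops2.ipac.caltech.edu",
-- ]
--
-- def _candidate_data_urls(url: str) -> list[str]:
--     prefix = None
--     for host in IRSA_HOSTS:
--         if url.startswith(host):
--             prefix = host
--             break
--     if prefix is None:
--         return [url]
--     rest = url[len(prefix):]
--     urls = [url]
--     for host in IRSA_HOSTS:
--         candidate = host + rest
--         if candidate not in urls:
--             urls.append(candidate)
--     return urls
-- ===== Notes on version B (the rewrite author's own statement) =====
-- stated objective: simpler
-- what changed: Replaces A's host x existing double loop (with startswith retested for every pair) by find-the-single-matching-prefix once, then one pass over the hosts building deduplicated candidates.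
import Mathlib
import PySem

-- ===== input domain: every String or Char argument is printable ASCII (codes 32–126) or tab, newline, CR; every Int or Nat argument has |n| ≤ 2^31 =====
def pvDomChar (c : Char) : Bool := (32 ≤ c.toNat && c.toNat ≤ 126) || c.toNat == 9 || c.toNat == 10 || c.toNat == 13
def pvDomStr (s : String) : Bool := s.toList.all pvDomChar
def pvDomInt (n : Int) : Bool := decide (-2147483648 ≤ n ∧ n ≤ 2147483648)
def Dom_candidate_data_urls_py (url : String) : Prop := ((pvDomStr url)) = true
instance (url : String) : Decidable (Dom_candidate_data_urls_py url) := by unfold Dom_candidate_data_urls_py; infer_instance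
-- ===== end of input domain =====

-- B replaces A's host×existing double loop by finding the single matching prefix once,
-- then one pass over the hosts building deduplicated candidates (objective: simpler).

def IRSA_HOSTS : List String :=
  ["https://irsa.ipac.caltech.edu", "https://irsawebops2.ipac.caltech.edu"]

-- ===== PORT A =====
-- Python 'host + url[len(existing):]' is ported as String.ofList of the char-list
-- concatenation (exact: Python str concatenation on code points).
def candidate_data_urls_py (url : String) : List String :=
  IRSA_HOSTS.foldl (fun urls host =>
    IRSA_HOSTS.foldl (fun urls existing =>
      if PySem.Str.startswith url existing then
        let candidate : String :=
          String.ofList (host.toList ++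
            (PySem.Str.slice url (some (PySem.Str.len existing)) none).toList)
        if candidate ∈ urls then urls else urls ++ [candidate]
      else urls) urls) [url]

-- ===== PORT B =====
-- 'for host in IRSA_HOSTS: if url.startswith(host): prefix = host; break'
def pvFindPrefix : List String → String → Option String
  | [], _ => none
  | h :: t, url => if PySem.Str.startswith url h then some h else pvFindPrefix t url

def candidate_data_urls_py_alt (url : String) : List String :=
  match pvFindPrefix IRSA_HOSTS url with
  | none => [url]
  | some p =>
    let rest := PySem.Str.slice url (some (PySem.Str.len p)) none
    IRSA_HOSTS.foldl (fun urls host =>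
      let candidate : String := String.ofList (host.toList ++ rest.toList)
      if candidate ∈ urls then urls else urls ++ [candidate]) [url]

-- ===== PRECONDITION & SPEC =====
def Spec_candidate_data_urls_py (url : String) (out : List String) : Prop := out = candidate_data_urls_py_alt url
instance (url : String) (out : List String) : Decidable (Spec_candidate_data_urls_py url out) := by unfold Spec_candidate_data_urls_py; infer_instance

-- ===== CLAIM (what is proved, stated in full; the proofs are below) =====
def Claim_equal_candidate_data_urls_py : Prop := ∀ (url : String), Dom_candidate_data_urls_py url → Spec_candidate_data_urls_py url (candidate_data_urls_py url)

-- ===== LEMMAS AND PROOFS =====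

-- Neither IRSA host is a prefix of the other, so at most one startswith test fires.
lemma pv_not_both (url : String)
    (h1 : PySem.Str.startswith url "https://irsa.ipac.caltech.edu" = true)
    (h2 : PySem.Str.startswith url "https://irsawebops2.ipac.caltech.edu" = true) : False := by
  rw [PySem.Str.startswith_eq, PySem.Chars.startswith_iff] at h1 h2
  rcases List.prefix_or_prefix_of_prefix h1 h2 with h | h <;> revert h <;> decide

theorem candidate_data_urls_py_spec_aux (url : String) :
    candidate_data_urls_py url = candidate_data_urls_py_alt url := by
  by_cases h1 : PySem.Str.startswith url "https://irsa.ipac.caltech.edu" = true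
  · have h2 : PySem.Str.startswith url "https://irsawebops2.ipac.caltech.edu" = false := by
      cases hh : PySem.Str.startswith url "https://irsawebops2.ipac.caltech.edu" with
      | false => rfl
      | true => exact (pv_not_both url h1 hh).elim
    simp only [candidate_data_urls_py, candidate_data_urls_py_alt, IRSA_HOSTS, pvFindPrefix,
      List.foldl_cons, List.foldl_nil, h1, h2, if_true, Bool.false_eq_true, if_false]
  · have h1' : PySem.Str.startswith url "https://irsa.ipac.caltech.edu" = false :=
      Bool.eq_false_iff.mpr (fun hh => h1 hh)
    by_cases h2 : PySem.Str.startswith url "https://irsawebops2.ipac.caltech.edu" = true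
    · simp only [candidate_data_urls_py, candidate_data_urls_py_alt, IRSA_HOSTS, pvFindPrefix,
        List.foldl_cons, List.foldl_nil, h1', h2, if_true, Bool.false_eq_true, if_false]
    · have h2' : PySem.Str.startswith url "https://irsawebops2.ipac.caltech.edu" = false :=
        Bool.eq_false_iff.mpr (fun hh => h2 hh)
      simp only [candidate_data_urls_py, candidate_data_urls_py_alt, IRSA_HOSTS, pvFindPrefix,
        List.foldl_cons, List.foldl_nil, h1', h2', Bool.false_eq_true, if_false]

-- ===== VERDICT (by name: the statement is the Claim_ definition above) =====
theorem candidate_data_urls_py_spec : Claim_equal_candidate_data_urls_py := by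
  intro url _
  exact candidate_data_urls_py_spec_aux url
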